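-- pv_equiv track=rewrite | github.com/nepthius/pokerbot | pokerrquiz.py | eval5
-- ===== SOURCE A (Python) =====
-- def rank_val(c):
--     return c[0]
--
-- def eval5(cards5):
--     ranks_list = []
--     for c in cards5:
--
--         v = rank_val(c)
--         ranks_list.append(v)
--
--     ranks = sorted(ranks_list, reverse=True)
--     suits = []
--     for c in cards5:
--         suit_char = c[1]
--         suits.append(suit_char)
--         counts = {}
--     for r in ranks:
--         counts[r] = counts.get(r, 0) + 1
--
--     is_flush = len(set(suits)) == 1
--
--     temp = sorted(set(ranks), reverse=True)
--     def straight_high(temp_ranks):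
--         if len(temp_ranks) < 5:
--             return None
--         for i in range(len(temp_ranks)-4):
--             w = temp_ranks[i:i+5]
--
--
--             if w[0]-w[4] == 4:
--                 return w[0]
--         if set([14,5,4,3,2]).issubset(set(temp_ranks)):
--             return 5
--         return None
--
--
--
--
--     st_hi = straight_high(temp)
--
--     by_count = sorted(counts.items(), key=lambda x:(x[1], x[0]), reverse=True)
--     if is_flush and st_hi:
--         return (8, st_hi)
--     if by_count[0][1] == 4:
--         return (7, by_count[0][0])
--     if by_count[0][1] == 3 and len(by_count) > 1 and by_count[1][1] == 2:
--         return (6, by_count[0][0])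
--     if is_flush:
--         return (5, *ranks)
--     if st_hi:
--
--         return (4, st_hi)
--     if by_count[0][1] == 3:
--         return (3, by_count[0][0])
--
--     if by_count[0][1] == 2 and len(by_count) > 1 and by_count[1][1] == 2:
--         hi, lo = by_count[0][0], by_count[1][0]
--         return (2, hi, lo)
--     if by_count[0][1] == 2:
--
--         return (1, by_count[0][0])
--     return (0, *ranks)
-- ===== SOURCE B (Python) =====
-- def _groups(xs):
--     # run-length encoding of the (descending-sorted) rank list
--     if not xs:
--         return []
--     k = 1
--     while k < len(xs) and xs[k] == xs[0]:
--         k += 1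
--     return [(xs[0], k)] + _groups(xs[k:])
--
-- def eval5(cards5):
--     ranks = sorted((c[0] for c in cards5), reverse=True)
--     groups = _groups(ranks)
--     vals = [g[0] for g in groups]
--     st = None
--     if len(vals) >= 5:
--         for t in vals:
--             if all(t - d in vals for d in (1, 2, 3, 4)):
--                 st = t
--                 break
--         if st is None and all(v in vals for v in (14, 5, 4, 3, 2)):
--             st = 5
--     flush = all(c[1] == cards5[0][1] for c in cards5)
--     r1, c1 = max(groups, key=lambda g: (g[1], g[0]))
--     rest = [g for g in groups if g[0] != r1]
--     r2, c2 = max(rest, key=lambda g: (g[1], g[0])) if rest else (0, 0)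
--     if flush and st:
--         return (8, st)
--     if c1 == 4:
--         return (7, r1)
--     if c1 == 3 and c2 == 2:
--         return (6, r1)
--     if flush:
--         return (5, *ranks)
--     if st:
--         return (4, st)
--     if c1 == 3:
--         return (3, r1)
--     if c1 == 2 and c2 == 2:
--         return (2, r1, r2)
--     if c1 == 2:
--         return (1, r1)
--     return (0, *ranks)
-- ===== Notes on version B (the rewrite author's own statement) =====
-- stated objective: alternative
-- what changed: B drops A's rank dictionary and its (count,rank)-sort entirely: it run-length-encodes the descending-sorted ranks into groups, finds the top one/two groups by two linear max scans, tests the flush by comparing every suit with the first card's, and detects the straight by looking for a rank whose four predecessors are all present instead of sliding 5-wide windows.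
import Mathlib
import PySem

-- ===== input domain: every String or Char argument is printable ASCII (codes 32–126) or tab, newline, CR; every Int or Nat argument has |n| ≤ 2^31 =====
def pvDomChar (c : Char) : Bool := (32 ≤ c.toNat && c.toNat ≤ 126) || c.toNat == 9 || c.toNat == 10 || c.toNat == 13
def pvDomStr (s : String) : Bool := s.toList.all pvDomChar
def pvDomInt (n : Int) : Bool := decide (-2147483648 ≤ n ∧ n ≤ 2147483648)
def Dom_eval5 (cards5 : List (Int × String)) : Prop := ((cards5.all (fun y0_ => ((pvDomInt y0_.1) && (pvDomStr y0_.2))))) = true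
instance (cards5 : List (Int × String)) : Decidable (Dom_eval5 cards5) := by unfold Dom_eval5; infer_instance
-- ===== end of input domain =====

-- B re-implements the hand evaluator without the rank dictionary and without sorting count pairs:
-- run-length groups over the sorted ranks, straight by rank membership, the top groups by two
-- max-scans (alternative decomposition, same cost class); return value only.

-- ===== PORT A =====
def rankVal (c : Int × String) : Int := c.1

-- straight_high: window scan over the slices, then the wheel check (literal port of A's helper)
def straightHighA (temp : List Int) : Option Int :=
  if temp.length < 5 then none
  else
    match (PySem.List.pyRange 0 (PySem.List.len temp - 4) 1).findSome? (fun i =>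
        let w := PySem.List.slice temp (some i) (some (i + 5))
        -- w[0]/w[4]: in range on every loop iteration (w has 5 elements), so pyGetD is exact here
        if PySem.List.pyGetD w 0 0 - PySem.List.pyGetD w 4 0 == 4 then some (PySem.List.pyGetD w 0 0) else none) with
    | some h => some h
    | none =>
        if PySem.Set.issubset (PySem.Set.ofList ([14, 5, 4, 3, 2] : List Int)) (PySem.Set.ofList temp) then
          some 5
        else none

def eval5 (cards5 : List (Int × String)) : List Int :=
  let ranks_list := cards5.foldl (fun acc c => acc ++ [rankVal c]) []
  let ranks := PySem.List.sorted ranks_list (fun r => r) true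
  -- the suits loop also re-binds counts = {} on every iteration; state = (suits, counts)
  let sc := cards5.foldl
      (fun (st : List String × PySem.Dict Int Int) c => (st.1 ++ [c.2], PySem.Dict.empty))
      ([], PySem.Dict.empty)
  let counts := ranks.foldl (fun d r => d.insert r (d.getD r 0 + 1)) sc.2
  let is_flush := PySem.Set.len (PySem.Set.ofList sc.1) == 1
  let temp := PySem.List.sorted (PySem.Set.ofList ranks) (fun r => r) true
  let st_hi := straightHighA temp
  let by_count := PySem.List.sorted2 counts.items (fun x => x.2) (fun x => x.1) true
  -- by_count[0] (and, under the length guard, by_count[1]); in range under Pre_ (cards5 ≠ [])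
  let b0 := PySem.List.pyGetD by_count 0 (0, 0)
  let b1 := PySem.List.pyGetD by_count 1 (0, 0)
  -- 'if st_hi:' (truthiness): none and some 0 are both falsy, i.e. st_hi.getD 0 ≠ 0
  if is_flush && (st_hi.getD 0 != 0) then [8, st_hi.getD 0]
  else if b0.2 == 4 then [7, b0.1]
  else if b0.2 == 3 && decide (1 < by_count.length) && b1.2 == 2 then [6, b0.1]
  else if is_flush then 5 :: ranks
  else if st_hi.getD 0 != 0 then [4, st_hi.getD 0]
  else if b0.2 == 3 then [3, b0.1]
  else if b0.2 == 2 && decide (1 < by_count.length) && b1.2 == 2 then [2, b0.1, b1.1]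
  else if b0.2 == 2 then [1, b0.1]
  else 0 :: ranks

-- ===== PORT B =====
-- _groups: the inner while loop counts the equal prefix (k = 1 + length of the run after the
-- head), so k is the takeWhile length + 1 and xs[k:] is the dropWhile remainder (exact)
def grpB : List Int → List (Int × Int)
  | [] => []
  | x :: xs =>
      (x, ((xs.takeWhile (fun y => y == x)).length : Int) + 1) :: grpB (xs.dropWhile (fun y => y == x))
termination_by l => l.length
decreasing_by
  exact Nat.lt_succ_of_le (List.length_dropWhile_le _ _)

def eval5_alt (cards5 : List (Int × String)) : List Int :=
  let ranks := PySem.List.sorted (cards5.map (fun c => c.1)) (fun r => r) true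
  let groups := grpB ranks
  let vals := groups.map (fun g => g.1)
  -- 'for t in vals: … break' is find?; 'x in vals' is membership
  let st : Option Int :=
    if 5 ≤ vals.length then
      match vals.find? (fun t => ([1, 2, 3, 4] : List Int).all (fun d => vals.contains (t - d))) with
      | some t => some t
      | none => if ([14, 5, 4, 3, 2] : List Int).all (fun v => vals.contains v) then some 5 else none
    else none
  -- cards5[0]: in range under Pre_ (cards5 ≠ [])
  let flush := cards5.all (fun c => c.2 == (PySem.List.pyGetD cards5 0 (0, "")).2)
  -- max(groups, key=…): groups is nonempty under Pre_, so the default is never read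
  let first := (PySem.List.max2? groups (fun g => g.2) (fun g => g.1)).getD (0, 0)
  let rest := groups.filter (fun g => g.1 != first.1)
  let second := if rest.isEmpty then ((0 : Int), (0 : Int))
                else (PySem.List.max2? rest (fun g => g.2) (fun g => g.1)).getD (0, 0)
  if flush && (st.getD 0 != 0) then [8, st.getD 0]
  else if first.2 == 4 then [7, first.1]
  else if first.2 == 3 && second.2 == 2 then [6, first.1]
  else if flush then 5 :: ranks
  else if st.getD 0 != 0 then [4, st.getD 0]
  else if first.2 == 3 then [3, first.1]
  else if first.2 == 2 && second.2 == 2 then [2, first.1, second.1]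
  else if first.2 == 2 then [1, first.1]
  else 0 :: ranks

-- ===== PRECONDITION & SPEC =====
-- A raises on the empty list (NameError: counts is never bound, then by_count[0]); B raises too (max of empty).
def Pre_eval5 (cards5 : List (Int × String)) : Prop := cards5 ≠ []
instance (cards5 : List (Int × String)) : Decidable (Pre_eval5 cards5) := by unfold Pre_eval5; infer_instance
def pvWitness_eval5 : (List (Int × String)) := [(14, "s"), (13, "s"), (12, "s"), (11, "s"), (10, "s")]

def Spec_eval5 (cards5 : List (Int × String)) (out : List Int) : Prop := out = eval5_alt cards5
instance (cards5 : List (Int × String)) (out : List Int) : Decidable (Spec_eval5 cards5 out) := by unfold Spec_eval5; infer_instance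

-- ===== CLAIM (what is proved, stated in full; the proofs are below) =====
def Claim_equal_eval5 : Prop := ∀ (cards5 : List (Int × String)), Dom_eval5 cards5 → Pre_eval5 cards5 → Spec_eval5 cards5 (eval5 cards5)

-- ===== LEMMAS AND PROOFS =====

-- the strict descending lexicographic order on (rank, count) pairs, compared count-first
def lexLt (a b : Int × Int) : Prop := a.2 < b.2 ∨ (a.2 = b.2 ∧ a.1 < b.1)

-- a fold that ignores its state and always writes k, started at k, stays at k
theorem foldl_const_self {α β : Type} (l : List α) (k : β) :
    l.foldl (fun _ _ => k) k = k := by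
  induction l with
  | nil => rfl
  | cons x t ih => simpa using ih

-- sorted2 is sorted with the lexicographic key
theorem sorted2_eq_sorted_lex {α : Type} (xs : List α) (k1 k2 : α → Int) (rev : Bool) :
    PySem.List.sorted2 xs k1 k2 rev
      = PySem.List.sorted xs (fun a => toLex (k1 a, k2 a)) rev := by
  have hpt : ∀ a b : α,
      (decide (k1 a < k1 b) || (!decide (k1 b < k1 a) && decide (k2 a < k2 b)))
        = decide (toLex (k1 a, k2 a) < toLex (k1 b, k2 b)) := by
    intro a b
    by_cases h1 : k1 a < k1 b <;> by_cases h2 : k1 b < k1 a <;> by_cases h3 : k2 a < k2 b <;>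
      simp [h1, h2, h3, Prod.Lex.lt_iff] <;> omega
  simp only [PySem.List.sorted2, PySem.List.sorted]
  cases rev
  · rw [show (fun a b : α => decide (k1 a < k1 b) || (!decide (k1 b < k1 a) && decide (k2 a < k2 b)))
        = (fun a b : α => decide (toLex (k1 a, k2 a) < toLex (k1 b, k2 b)))
      from funext fun a => funext fun b => hpt a b]
    rfl
  · rw [show (fun a b : α => decide (k1 b < k1 a) || (!decide (k1 a < k1 b) && decide (k2 b < k2 a)))
        = (fun a b : α => decide (toLex (k1 b, k2 b) < toLex (k1 a, k2 a)))
      from funext fun a => funext fun b => hpt b a]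
    rfl

-- A's by_count is strictly descending in the lexicographic (count, rank) key
theorem byc_pairwise (r0 : List Int) :
    (PySem.List.sorted2 (PySem.Dict.counter r0).items (fun x => x.2) (fun x => x.1) true).Pairwise
      (fun a b => lexLt b a) := by
  set L := PySem.List.sorted2 (PySem.Dict.counter r0).items (fun x => x.2) (fun x => x.1) true with hL
  have hle : L.Pairwise (fun a b : Int × Int =>
      (toLex (b.2, b.1) : Lex (Int × Int)) ≤ toLex (a.2, a.1)) := by
    rw [hL, sorted2_eq_sorted_lex]
    exact PySem.List.sorted_pairwise_rev _ _
  have hnodupfst : (L.map (fun p : Int × Int => p.1)).Nodup := by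
    have h1 : ((PySem.Dict.counter r0).items.map (fun p : Int × Int => p.1)).Nodup := by
      rw [PySem.Dict.items_counter, List.map_map]
      have hid : ((fun p : Int × Int => p.1) ∘ fun k : Int => (k, (List.count k r0 : Int))) = id := rfl
      rw [hid, List.map_id]
      exact PySem.Set.nodup_ofList r0
    exact ((List.Perm.map _ (PySem.List.sorted2_perm _ _ _ _)).nodup_iff).mpr h1
  have hne : L.Pairwise (fun a b : Int × Int => a.1 ≠ b.1) := List.pairwise_map.mp hnodupfst
  refine (hle.and hne).imp ?_
  intro a b hab
  obtain ⟨h1, h2⟩ := hab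
  rw [Prod.Lex.le_iff] at h1
  simp only [ofLex_toLex] at h1
  unfold lexLt
  omega

-- membership in by_count names exactly the (rank, count) pairs of r0
theorem mem_byc (r0 : List Int) (p : Int × Int) :
    p ∈ PySem.List.sorted2 (PySem.Dict.counter r0).items (fun x => x.2) (fun x => x.1) true
      ↔ p.1 ∈ r0 ∧ p.2 = (r0.count p.1 : Int) := by
  rw [(PySem.List.sorted2_perm _ _ _ _).mem_iff, PySem.Dict.items_counter]
  simp only [List.mem_map, PySem.Set.mem_ofList]
  constructor
  · rintro ⟨k, hk, rfl⟩; exact ⟨hk, rfl⟩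
  · rintro ⟨h1, h2⟩; exact ⟨p.1, h1, by rw [← h2]⟩

-- facts about the head run of a desc-sorted list
theorem run_facts (x : Int) (xs : List Int) (h : (x :: xs).Pairwise (fun a b => b ≤ a)) :
    (∀ y ∈ xs.dropWhile (fun y => y == x), y < x)
    ∧ (xs.takeWhile (fun y => y == x)).length + 1 = (x :: xs).count x
    ∧ (xs.dropWhile (fun y => y == x)).Pairwise (fun a b => b ≤ a) := by
  rw [List.pairwise_cons] at h
  obtain ⟨hx, hxs⟩ := h
  have hpre : ∀ y ∈ xs.takeWhile (fun y => y == x), y = x := by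
    intro y hy; simpa using List.mem_takeWhile_imp hy
  have hsufpw : (xs.dropWhile (fun y => y == x)).Pairwise (fun a b : Int => b ≤ a) :=
    List.Pairwise.sublist (List.dropWhile_sublist _) hxs
  have hsuflt : ∀ y ∈ xs.dropWhile (fun y => y == x), y < x := by
    cases hd : xs.dropWhile (fun y => y == x) with
    | nil => intro y hy; simp at hy
    | cons z rest =>
      have hz : ¬ (z == x) = true := by
        have := List.head?_dropWhile_not (fun y => y == x) xs
        rw [hd] at this; simpa using this
      have hzx : z < x := by
        have hzmem : z ∈ xs := (List.dropWhile_sublist _).mem (by rw [hd]; simp)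
        have := hx z hzmem
        simp at hz; omega
      intro y hy
      rcases List.mem_cons.mp hy with rfl | hy2
      · exact hzx
      · have hpw := hsufpw; rw [hd, List.pairwise_cons] at hpw
        exact lt_of_le_of_lt (hpw.1 y hy2) hzx
  refine ⟨hsuflt, ?_, hsufpw⟩
  · have hsplit := List.takeWhile_append_dropWhile (p := fun y => y == x) (l := xs)
    have hcnt : (x :: xs).count x = 1 + (xs.takeWhile (fun y => y == x)).count x
        + (xs.dropWhile (fun y => y == x)).count x := by
      rw [List.count_cons_self]
      conv_lhs => rw [← hsplit]
      rw [List.count_append]; ring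
    have h1 : (xs.takeWhile (fun y => y == x)).count x = (xs.takeWhile (fun y => y == x)).length :=
      List.count_eq_length.mpr (fun b hb => (hpre b hb).symm)
    have h2 : (xs.dropWhile (fun y => y == x)).count x = 0 :=
      List.count_eq_zero.mpr (fun hmem => lt_irrefl x (hsuflt x hmem))
    omega

theorem mem_grpB (l : List Int) (h : l.Pairwise (fun a b => b ≤ a)) (p : Int × Int) :
    p ∈ grpB l ↔ p.1 ∈ l ∧ p.2 = (l.count p.1 : Int) := by
  induction l using grpB.induct with
  | case1 => simp [grpB]
  | case2 x xs ih =>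
    obtain ⟨hsuflt, hcnt, hsufpw⟩ := run_facts x xs h
    rw [grpB]
    simp only [List.mem_cons, ih hsufpw]
    constructor
    · rintro (rfl | ⟨h1, h2⟩)
      · refine ⟨by simp, ?_⟩; simp only; omega
      · have hne : p.1 ≠ x := by intro he; rw [he] at h1; exact lt_irrefl x (hsuflt x h1)
        refine ⟨List.mem_cons.mp (List.mem_cons_of_mem _ ((List.dropWhile_sublist _).mem h1)), ?_⟩
        rw [h2]
        congr 1
        -- count in the suffix = count in the whole list for a value below the head run
        have hsplit := List.takeWhile_append_dropWhile (p := fun y => y == x) (l := xs)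
        have hc1 : (x :: xs).count p.1 = xs.count p.1 := by
          simp [Ne.symm hne]
        have hc2 : xs.count p.1 = (xs.takeWhile (fun y => y == x)).count p.1
            + (xs.dropWhile (fun y => y == x)).count p.1 := by
          conv_lhs => rw [← hsplit]
          rw [List.count_append]
        have h0 : (xs.takeWhile (fun y => y == x)).count p.1 = 0 := by
          refine List.count_eq_zero.mpr (fun hmem => ?_)
          have := List.mem_takeWhile_imp hmem
          simp at this; exact hne this
        omega
    · rintro ⟨h1, h2⟩
      by_cases he : p.1 = x
      · left
        have : p = (p.1, p.2) := rfl
        rw [this, he]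
        have : p.2 = ((xs.takeWhile (fun y => y == x)).length : Int) + 1 := by
          rw [h2, he]; push_cast [← hcnt]; ring
        rw [this]
      · right
        have hmem : p.1 ∈ xs.dropWhile (fun y => y == x) := by
          rcases h1 with h | h
          · exact absurd h he
          · rw [← List.takeWhile_append_dropWhile (p := fun y => y == x) (l := xs)] at h
            rcases List.mem_append.mp h with h | h
            · exact absurd (by simpa using List.mem_takeWhile_imp h) he
            · exact h
        refine ⟨hmem, ?_⟩
        rw [h2]; congr 1
        have hsplit := List.takeWhile_append_dropWhile (p := fun y => y == x) (l := xs)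
        have hxne : ¬ x = p.1 := fun hq => he hq.symm
        have hc1 : (x :: xs).count p.1 = xs.count p.1 := by
          simp [hxne]
        have hc2 : xs.count p.1 = (xs.takeWhile (fun y => y == x)).count p.1
            + (xs.dropWhile (fun y => y == x)).count p.1 := by
          conv_lhs => rw [← hsplit]
          rw [List.count_append]
        have h0 : (xs.takeWhile (fun y => y == x)).count p.1 = 0 := by
          refine List.count_eq_zero.mpr (fun hmem2 => ?_)
          have := List.mem_takeWhile_imp hmem2
          simp at this; exact he this
        omega

theorem grpB_fst_pairwise (l : List Int) (h : l.Pairwise (fun a b => b ≤ a)) :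
    ((grpB l).map (fun g => g.1)).Pairwise (fun a b => b < a) := by
  induction l using grpB.induct with
  | case1 => simp [grpB]
  | case2 x xs ih =>
    obtain ⟨hsuflt, hcnt, hsufpw⟩ := run_facts x xs h
    rw [grpB]
    simp only [List.map_cons, List.pairwise_cons]
    refine ⟨?_, ih hsufpw⟩
    intro b hb
    simp only [List.mem_map] at hb
    obtain ⟨p, hp, rfl⟩ := hb
    exact hsuflt p.1 ((mem_grpB _ hsufpw p).mp hp).1

-- B's vals is A's temp (sorted(set(ranks), reverse=True))
theorem vals_eq_temp (l : List Int) (h : l.Pairwise (fun a b => b ≤ a)) :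
    (grpB l).map (fun g => g.1)
      = PySem.List.sorted (PySem.Set.ofList l) (fun r => r) true := by
  refine (PySem.List.sorted_rev_eq_of_perm_of_pairwise_gt _ _ _ ?_ (grpB_fst_pairwise l h)).symm
  have hnd : ((grpB l).map (fun g => g.1)).Nodup :=
    List.Pairwise.imp (fun hlt => (ne_of_lt hlt).symm) (grpB_fst_pairwise l h)
  refine (List.perm_ext_iff_of_nodup hnd (PySem.Set.nodup_ofList l)).mpr (fun a => ?_)
  rw [PySem.Set.mem_ofList]
  simp only [List.mem_map]
  constructor
  · rintro ⟨p, hp, rfl⟩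
    exact ((mem_grpB l h p).mp hp).1
  · intro ha
    exact ⟨(a, (l.count a : Int)), (mem_grpB l h _).mpr ⟨ha, rfl⟩, rfl⟩

-- Python's max(xs, key=(count, rank)) picks the unique lexicographic maximum
-- the running-max fold, started at a value that is m or below, lands on m
theorem max2_aux (xs : List (Int × Int)) (m : Int × Int) :
    ∀ a, (m = a ∨ m ∈ xs) → (∀ y, (y = a ∨ y ∈ xs) → y ≠ m → lexLt y m) →
    xs.foldl
      (fun acc x =>
        match acc with
        | none => some x
        | some w =>
          if (decide (w.2 < x.2) || !decide (x.2 < w.2) && decide (w.1 < x.1)) = true then some x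
          else some w)
      (some a) = some m := by
  induction xs with
  | nil =>
    intro a h1 _
    simp only [List.foldl_nil]
    rcases h1 with rfl | h
    · rfl
    · exact absurd h (List.not_mem_nil)
  | cons x rest ih =>
    intro a h1 h2
    simp only [List.foldl_cons]
    by_cases hb : (decide (a.2 < x.2) || !decide (x.2 < a.2) && decide (a.1 < x.1)) = true
    · rw [if_pos hb]
      refine ih x ?_ ?_
      · rcases h1 with rfl | h
        · -- a = m beaten by x : impossible unless x = m
          by_cases hxm : x = m
          · exact Or.inl hxm.symm
          · have := h2 x (Or.inr (by simp)) hxm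
            unfold lexLt at this
            simp only [Bool.or_eq_true, Bool.and_eq_true, Bool.not_eq_true',
              decide_eq_true_eq, decide_eq_false_iff_not] at hb
            omega
        · rcases List.mem_cons.mp h with rfl | h
          · exact Or.inl rfl
          · exact Or.inr h
      · intro y hy hym
        exact h2 y (by rcases hy with rfl | hy
                       · exact Or.inr (by simp)
                       · exact Or.inr (List.mem_cons_of_mem _ hy)) hym
    · rw [if_neg hb]
      refine ih a ?_ ?_
      · rcases h1 with rfl | h
        · exact Or.inl rfl
        · rcases List.mem_cons.mp h with rfl | h
          · -- m = x was not taken: then a must already be m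
            by_cases ham : a = m
            · exact Or.inl ham.symm
            · have := h2 a (Or.inl rfl) ham
              unfold lexLt at this
              simp only [Bool.or_eq_true, Bool.and_eq_true, Bool.not_eq_true',
                decide_eq_true_eq, decide_eq_false_iff_not] at hb
              omega
          · exact Or.inr h
      · intro y hy hym
        exact h2 y (by rcases hy with rfl | hy
                       · exact Or.inl rfl
                       · exact Or.inr (List.mem_cons_of_mem _ hy)) hym

theorem max2_of_unique (xs : List (Int × Int)) (m : Int × Int)
    (hmem : m ∈ xs) (hmax : ∀ y ∈ xs, y ≠ m → lexLt y m) :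
    PySem.List.max2? xs (fun g => g.2) (fun g => g.1) = some m := by
  cases xs with
  | nil => exact absurd hmem (List.not_mem_nil)
  | cons x rest =>
    have : PySem.List.max2? (x :: rest) (fun g : Int × Int => g.2) (fun g : Int × Int => g.1)
        = rest.foldl
          (fun acc y =>
            match acc with
            | none => some y
            | some w =>
              if (decide (w.2 < y.2) || !decide (y.2 < w.2) && decide (w.1 < y.1)) = true then some y
              else some w)
          (some x) := by
      unfold PySem.List.max2?
      rw [List.foldl_cons]
      congr 1
      · funext acc y
        cases acc <;> rfl
    rw [this]
    refine max2_aux rest m x ?_ ?_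
    · rcases List.mem_cons.mp hmem with rfl | h
      · exact Or.inl rfl
      · exact Or.inr h
    · intro y hy hym
      refine hmax y ?_ hym
      rcases hy with rfl | hy
      · simp
      · exact List.mem_cons_of_mem _ hy

-- first-window search vs first-rank-with-four-predecessors search, plus the helpers they need

theorem find?_congr_mem {α : Type} (l : List α) (f g : α → Bool)
    (h : ∀ x ∈ l, f x = g x) : l.find? f = l.find? g := by
  induction l with
  | nil => rfl
  | cons x t ih =>
    rw [List.find?_cons, List.find?_cons, h x (by simp)]
    cases g x with
    | true => rfl
    | false => exact ih (fun y hy => h y (by simp [hy]))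

theorem four_distinct_le (x : Int) (l : List Int)
    (h1 : x - 1 ∈ l) (h2 : x - 2 ∈ l) (h3 : x - 3 ∈ l) (h4 : x - 4 ∈ l) :
    4 ≤ l.length := by
  have hS : ([x - 1, x - 2, x - 3, x - 4] : List Int).Nodup := by
    simp [List.nodup_cons, List.mem_cons]
  have hsub : ([x - 1, x - 2, x - 3, x - 4] : List Int) ⊆ l := by
    intro v hv
    simp only [List.mem_cons, List.not_mem_nil, or_false] at hv
    rcases hv with rfl | rfl | rfl | rfl <;> assumption
  simpa using (List.subperm_of_subset hS hsub).length_le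

theorem window_eq_mem (temp : List Int) :
    temp.Pairwise (fun a b => b < a) →
    ((temp.zip (temp.drop 4)).find? (fun p => p.1 - p.2 == 4)).map (fun p => p.1)
      = temp.find? (fun t => ([1, 2, 3, 4] : List Int).all (fun d => temp.contains (t - d))) := by
  induction temp with
  | nil => intro _; rfl
  | cons x rest ih =>
    intro hpw
    have hx : ∀ y ∈ rest, y < x := (List.pairwise_cons.mp hpw).1
    have hrest : rest.Pairwise (fun a b => b < a) := (List.pairwise_cons.mp hpw).2
    have hnd : rest.Nodup := hrest.imp (fun h => ne_of_gt h)
    -- the full-list membership test equals the tail-only test on tail elements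
    have hqt : ∀ t ∈ rest,
        (([1, 2, 3, 4] : List Int).all (fun d => (x :: rest).contains (t - d)))
          = (([1, 2, 3, 4] : List Int).all (fun d => rest.contains (t - d))) := by
      intro t ht
      have htx : t < x := hx t ht
      have hc : ∀ d : Int, 1 ≤ d → ((x :: rest).contains (t - d)) = (rest.contains (t - d)) := by
        intro d hd
        rw [List.contains_cons, show ((t - d == x) : Bool) = false from
          beq_eq_false_iff_ne.mpr (by omega), Bool.false_or]
      simp only [List.all_cons, List.all_nil, Bool.and_true,
        hc 1 (by norm_num), hc 2 (by norm_num), hc 3 (by norm_num), hc 4 (by norm_num)]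
    have htail : rest.find? (fun t => ([1, 2, 3, 4] : List Int).all (fun d => (x :: rest).contains (t - d)))
        = rest.find? (fun t => ([1, 2, 3, 4] : List Int).all (fun d => rest.contains (t - d))) :=
      find?_congr_mem _ _ _ hqt
    have hdrop4 : (x :: rest).drop 4 = rest.drop 3 := rfl
    cases hd : rest.drop 3 with
    | nil =>
      have hlen3 : rest.length ≤ 3 := List.drop_eq_nil_iff.mp hd
      have hzip : (x :: rest).zip ((x :: rest).drop 4) = ([] : List (Int × Int)) := by
        rw [hdrop4, hd, List.zip_nil_right]
      have hqx : (([1, 2, 3, 4] : List Int).all (fun d => (x :: rest).contains (x - d))) = false := by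
        by_contra hq
        rw [Bool.not_eq_false] at hq
        simp only [List.all_cons, List.all_nil, Bool.and_true, Bool.and_eq_true,
          List.contains_cons, Bool.or_eq_true, beq_iff_eq, List.contains_iff_mem] at hq
        obtain ⟨m1, m2, m3, m4⟩ := hq
        have hm : ∀ d : Int, 1 ≤ d → (x - d = x ∨ x - d ∈ rest) → x - d ∈ rest := by
          intro d hd1 hmm
          rcases hmm with h | h
          · omega
          · exact h
        have h4 := four_distinct_le x rest (hm 1 (by norm_num) m1) (hm 2 (by norm_num) m2)
          (hm 3 (by norm_num) m3) (hm 4 (by norm_num) m4)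
        omega
      rw [hzip, List.find?_nil, Option.map_none, List.find?_cons_of_neg (by simp only [Bool.not_eq_true]; exact hqx),
        htail, ← ih hrest, List.drop_eq_nil_of_le (show rest.length ≤ 4 by omega),
        List.zip_nil_right, List.find?_nil, Option.map_none]
    | cons z zs =>
      have h3lt : 3 < rest.length := by
        by_contra hle
        rw [List.drop_eq_nil_of_le (by omega)] at hd
        simp at hd
      have hz : rest[3]'h3lt = z := by
        have h0 : (rest.drop 3)[0]'(by rw [hd]; simp) = rest[3 + 0]'(by omega) := List.getElem_drop
        simpa [hd] using h0.symm
      have hzs : zs = rest.drop 4 := by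
        have h1 : List.drop 1 (rest.drop 3) = rest.drop 4 := by rw [List.drop_drop]
        rw [hd] at h1
        simpa using h1
      -- chain of the first five elements
      have hgr := List.pairwise_iff_getElem.mp hrest
      have e01 : rest[1]'(by omega) < rest[0]'(by omega) := hgr 0 1 (by omega) (by omega) (by omega)
      have e12 : rest[2]'(by omega) < rest[1]'(by omega) := hgr 1 2 (by omega) (by omega) (by omega)
      have e23 : rest[3]'(by omega) < rest[2]'(by omega) := hgr 2 3 (by omega) (by omega) (by omega)
      have e0x : rest[0]'(by omega) < x := hx _ (List.getElem_mem _)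
      have hkey : ((x - z == 4) : Bool)
          = (([1, 2, 3, 4] : List Int).all (fun d => (x :: rest).contains (x - d))) := by
        rw [Bool.eq_iff_iff, beq_iff_eq]
        simp only [List.all_cons, List.all_nil, Bool.and_true, Bool.and_eq_true,
          List.contains_cons, Bool.or_eq_true, beq_iff_eq,
          List.contains_iff_mem]
        constructor
        · intro h4z
          have ha : rest[0]'(by omega) = x - 1 := by omega
          have hb : rest[1]'(by omega) = x - 2 := by omega
          have hc : rest[2]'(by omega) = x - 3 := by omega
          refine ⟨Or.inr ?_, Or.inr ?_, Or.inr ?_, Or.inr ?_⟩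
          · rw [← ha]; exact List.getElem_mem _
          · rw [← hb]; exact List.getElem_mem _
          · rw [← hc]; exact List.getElem_mem _
          · rw [show x - 4 = z from by omega, ← hz]; exact List.getElem_mem _
        · rintro ⟨m1, m2, m3, m4⟩
          have hm : ∀ d : Int, 1 ≤ d → d ≤ 4 → (x - d = x ∨ x - d ∈ rest) → x - d ∈ rest := by
            intro d hd1 hd4 hmm
            rcases hmm with h | h
            · omega
            · exact h
          have m1' := hm 1 (by norm_num) (by norm_num) m1
          have m2' := hm 2 (by norm_num) (by norm_num) m2
          have m3' := hm 3 (by norm_num) (by norm_num) m3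
          have m4' := hm 4 (by norm_num) (by norm_num) m4
          -- upper bound: four strict integer steps
          have hup : z ≤ x - 4 := by omega
          -- lower bound: otherwise the four predecessors crowd into the first three slots
          by_contra hne
          have hlow : z ≤ x - 5 := by omega
          have htake : ∀ v : Int, v ∈ rest → x - 4 ≤ v → v ∈ rest.take 3 := by
            intro v hv hge
            obtain ⟨i, hi, rfl⟩ := List.mem_iff_getElem.mp hv
            have hilt : i < 3 := by
              by_contra hige
              have : rest[i] ≤ rest[3]'h3lt := by
                rcases Nat.lt_or_ge 3 i with h | h
                · exact le_of_lt (hgr 3 i h3lt hi h)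
                · have : i = 3 := by omega
                  subst this; exact le_refl _
              omega
            have : (rest.take 3)[i]'(by simp [List.length_take]; omega) = rest[i] :=
              List.getElem_take
            rw [← this]; exact List.getElem_mem _
          have h4 : 4 ≤ (rest.take 3).length :=
            four_distinct_le x (rest.take 3)
              (htake _ m1' (by omega)) (htake _ m2' (by omega)) (htake _ m3' (by omega))
              (htake _ m4' (by omega))
          rw [List.length_take] at h4
          omega
      -- assemble the cons step
      rw [hdrop4, hd, List.zip_cons_cons, List.find?_cons, List.find?_cons, ← hkey]
      cases hxz : ((x - z == 4) : Bool) with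
      | true => rfl
      | false => rw [htail, ← ih hrest, hzs]

theorem zip_drop_eq_map_range (temp : List Int) :
    temp.zip (temp.drop 4)
      = (List.range (temp.length - 4)).map (fun j => (temp.getD j 0, temp.getD (j + 4) 0)) := by
  apply List.ext_getElem
  · simp [List.length_zip]
  · intro i h1 h2
    simp only [List.length_zip, List.length_drop] at h1
    have hi : i < temp.length - 4 := by omega
    have e1 : temp.getD i 0 = temp[i]'(by omega) := List.getD_eq_getElem _ _ (by omega)
    have e2 : temp.getD (i + 4) 0 = temp[i + 4]'(by omega) := List.getD_eq_getElem _ _ (by omega)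
    rw [List.getElem_zip, List.getElem_map, List.getElem_range, e1, e2]
    have e3 : (List.drop 4 temp)[i]'(by simpa using by omega) = temp[4 + i]'(by omega) := List.getElem_drop ..
    rw [e3]
    simp only [show 4 + i = i + 4 from by omega]

theorem findSome?_if_eq_map_find? {α β : Type} (l : List α) (q : α → Bool) (h : α → β) :
    l.findSome? (fun x => if q x then some (h x) else none) = (l.find? q).map h := by
  induction l with
  | nil => rfl
  | cons x t ih =>
    by_cases hx : q x
    · simp [hx]
    · simp [hx, ih]

theorem findSome?_congr_mem {α β : Type} (l : List α) (f g : α → Option β)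
    (hfg : ∀ x ∈ l, f x = g x) : l.findSome? f = l.findSome? g := by
  induction l with
  | nil => rfl
  | cons x t ih =>
    simp only [List.findSome?_cons, hfg x (by simp)]
    cases g x with
    | some v => rfl
    | none => exact ih (fun y hy => hfg y (by simp [hy]))

-- A's window loop, written as the first matching window endpoint pair
theorem windowA_find (temp : List Int) (hlen : 5 ≤ temp.length) :
    (PySem.List.pyRange 0 (PySem.List.len temp - 4) 1).findSome? (fun i =>
        let w := PySem.List.slice temp (some i) (some (i + 5))
        if PySem.List.pyGetD w 0 0 - PySem.List.pyGetD w 4 0 == 4 then some (PySem.List.pyGetD w 0 0) else none)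
      = ((temp.zip (temp.drop 4)).find? (fun p => p.1 - p.2 == 4)).map (fun p => p.1) := by
  rw [zip_drop_eq_map_range, List.find?_map]
  rw [Option.map_map]
  rw [PySem.List.len_eq, show (temp.length : Int) - 4 = ((temp.length - 4 : Nat) : Int) from by omega,
    PySem.List.pyRange_zero_natCast, List.findSome?_map]
  rw [findSome?_congr_mem _ _ (fun j : Nat =>
    if ((fun p : Int × Int => p.1 - p.2 == 4) ∘ (fun j => (temp.getD j 0, temp.getD (j + 4) 0))) j
    then some (((fun p : Int × Int => p.1) ∘ (fun j : Nat => (temp.getD j 0, temp.getD (j + 4) 0))) j) else none) ?_]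
  · exact findSome?_if_eq_map_find? _ _ _
  · intro j hj
    rw [List.mem_range] at hj
    have hj5 : j + 5 ≤ temp.length := by omega
    have hw : PySem.List.slice temp (some (j : Int)) (some ((j : Int) + 5))
        = (temp.drop j).take 5 := by
      rw [PySem.List.slice_toNat temp (by positivity) (by positivity)]
      rw [show ((j : Int) + 5).toNat = j + 5 from by omega, Int.toNat_natCast]
      rw [show j + 5 - j = 5 from by omega]
    simp only [Function.comp, hw]
    have hlw : ((temp.drop j).take 5).length = 5 := by
      simp [List.length_take, List.length_drop]; omega
    have h0 : ((temp.drop j).take 5).getD 0 0 = temp.getD j 0 := by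
      rw [List.getD_eq_getElem _ _ (by omega), List.getD_eq_getElem _ _ (by omega),
        List.getElem_take, List.getElem_drop]
      simp
    have h4 : ((temp.drop j).take 5).getD 4 0 = temp.getD (j + 4) 0 := by
      rw [List.getD_eq_getElem _ _ (by omega), List.getD_eq_getElem _ _ (by omega),
        List.getElem_take, List.getElem_drop]
    simp only [PySem.List.pyGetD_ofNat', h0, h4]

-- the two wheel tests agree
theorem wheel_eq (temp : List Int) :
    PySem.Set.issubset (PySem.Set.ofList ([14, 5, 4, 3, 2] : List Int)) (PySem.Set.ofList temp)
      = ([14, 5, 4, 3, 2] : List Int).all (fun v => temp.contains v) := by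
  rw [Bool.eq_iff_iff, PySem.Set.issubset_iff]
  simp [PySem.Set.mem_ofList]

-- the two straight detectors agree on a strictly descending list of distinct ranks
theorem straight_eq_alt (temp : List Int) (hpw : temp.Pairwise (fun a b => b < a)) :
    straightHighA temp
      = (if 5 ≤ temp.length then
          match temp.find? (fun t => ([1, 2, 3, 4] : List Int).all (fun d => temp.contains (t - d))) with
          | some t => some t
          | none => if ([14, 5, 4, 3, 2] : List Int).all (fun v => temp.contains v) then some 5 else none
         else none) := by
  by_cases hlen : temp.length < 5
  · unfold straightHighA
    rw [if_pos hlen, if_neg (show ¬ 5 ≤ temp.length from by omega)]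
  · unfold straightHighA
    rw [if_neg hlen, if_pos (by omega : 5 ≤ temp.length)]
    rw [windowA_find temp (by omega), window_eq_mem temp hpw, wheel_eq]

-- the two flush tests agree on a nonempty hand
theorem flush_eq (c : Int × String) (cs : List (Int × String)) :
    (PySem.Set.len (PySem.Set.ofList ((c :: cs).foldl (fun acc x => acc ++ [x.2]) [])) == 1)
      = (c :: cs).all (fun x => x.2 == (PySem.List.pyGetD (c :: cs) 0 (0, "")).2) := by
  rw [PySem.List.foldl_append_singleton_eq_map (fun x : Int × String => x.2) (c :: cs) [],
    List.nil_append, PySem.List.pyGetD_zero_cons]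
  rw [Bool.eq_iff_iff]
  simp only [List.all_eq_true, beq_iff_eq, List.map_cons, PySem.Set.ofList_cons, PySem.Set.len,
    List.length_cons, Nat.cast_eq_one, Nat.add_eq_right, List.length_eq_zero_iff]
  constructor
  · intro hnil x hx
    rcases List.mem_cons.mp hx with rfl | hx
    · rfl
    · by_contra hne
      have hmem : x.2 ∈ PySem.Set.discard (PySem.Set.ofList (cs.map (fun x => x.2))) c.2 :=
        (PySem.Set.mem_discard _ _ _).mpr
          ⟨(PySem.Set.mem_ofList _ _).mpr (List.mem_map_of_mem hx), hne⟩
      rw [hnil] at hmem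
      exact List.not_mem_nil hmem
  · intro hall
    rw [List.eq_nil_iff_forall_not_mem]
    intro y hy
    obtain ⟨hy1, hy2⟩ := (PySem.Set.mem_discard _ _ _).mp hy
    obtain ⟨x, hx, rfl⟩ := List.mem_map.mp ((PySem.Set.mem_ofList _ _).mp hy1)
    exact hy2 (hall x (List.mem_cons_of_mem _ hx))

-- ===== VERDICT (by name: the statement is the Claim_ definition above) =====
theorem eval5_spec : Claim_equal_eval5 := by
  intro cards5 _hdom hpre
  unfold Spec_eval5
  obtain ⟨c, cs, rfl⟩ := List.exists_cons_of_ne_nil hpre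
  simp only [eval5, eval5_alt]
  rw [PySem.List.foldl_append_singleton_eq_map rankVal (c :: cs) [], List.nil_append]
  rw [PySem.List.foldl_prod_mk (f := fun (acc : List String) (x : Int × String) => acc ++ [x.2])
      (g := fun (_ : PySem.Dict Int Int) (_ : Int × String) => (PySem.Dict.empty : PySem.Dict Int Int))
      (c :: cs) [] PySem.Dict.empty]
  dsimp only
  rw [foldl_const_self (c :: cs) (PySem.Dict.empty : PySem.Dict Int Int)]
  rw [PySem.Dict.foldl_insert_getD_add_one_eq_counter]
  rw [flush_eq c cs]
  rw [show (List.map rankVal (c :: cs)) = List.map (fun x : Int × String => x.1) (c :: cs) from rfl]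
  set r0 := List.map (fun x : Int × String => x.1) (c :: cs) with hr0
  set ranks := PySem.List.sorted r0 (fun r => r) true with hranks
  have hrpw : ranks.Pairwise (fun a b => b ≤ a) := PySem.List.sorted_pairwise_rev r0 (fun r => r)
  have hvals := vals_eq_temp ranks hrpw
  have htpw : ((grpB ranks).map (fun g => g.1)).Pairwise (fun a b => b < a) :=
    grpB_fst_pairwise ranks hrpw
  rw [← hvals, straight_eq_alt _ htpw]
  set G := grpB ranks with hG
  set L := PySem.List.sorted2 (PySem.Dict.counter ranks).items (fun x => x.2) (fun x => x.1) true with hL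
  -- membership transfer between L and G
  have hGL : ∀ p : Int × Int, p ∈ G ↔ p ∈ L := by
    intro p
    rw [hG, hL, mem_grpB ranks hrpw p, mem_byc ranks p]
  have hLpw : L.Pairwise (fun a b => lexLt b a) := byc_pairwise ranks
  -- L determines the count from the rank
  have hLkey : ∀ p q : Int × Int, p ∈ L → q ∈ L → p.1 = q.1 → p = q := by
    intro p q hp hq h1
    rw [mem_byc ranks p] at hp
    rw [mem_byc ranks q] at hq
    have : p.2 = q.2 := by rw [hp.2, hq.2, h1]
    exact Prod.ext h1 this
  -- L is nonempty
  obtain ⟨m, t, hmt⟩ : ∃ m t, L = m :: t := by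
    cases hc : L with
    | nil =>
      exfalso
      have hcm : c.1 ∈ ranks := by
        rw [hranks, PySem.List.mem_sorted, hr0]
        exact List.mem_map_of_mem (by simp)
      have : ((c.1, (ranks.count c.1 : Int)) : Int × Int) ∈ L := (mem_byc ranks _).mpr ⟨hcm, rfl⟩
      rw [hc] at this
      exact List.not_mem_nil this
    | cons m t => exact ⟨m, t, rfl⟩
  have hmL : m ∈ L := by rw [hmt]; simp
  -- b0 = m = B's first
  have hb0 : PySem.List.pyGetD L 0 ((0 : Int), (0 : Int)) = m := by
    rw [hmt, PySem.List.pyGetD_zero_cons]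
  have hfirst : (PySem.List.max2? G (fun g => g.2) (fun g => g.1)).getD (0, 0) = m := by
    rw [max2_of_unique G m ((hGL m).mpr hmL) ?_]
    · rfl
    · intro y hy hym
      have : y ∈ L := (hGL y).mp hy
      rw [hmt] at this
      rcases List.mem_cons.mp this with rfl | hyt
      · exact absurd rfl hym
      · exact (List.pairwise_cons.mp (hmt ▸ hLpw)).1 y hyt
  rw [hb0, hfirst]
  -- the second group
  have hrest : ∀ y : Int × Int, y ∈ G.filter (fun g => g.1 != m.1) ↔ y ∈ t := by
    intro y
    rw [List.mem_filter, hGL y, hmt]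
    constructor
    · rintro ⟨hyL, hne⟩
      rcases List.mem_cons.mp hyL with rfl | hyt
      · simp at hne
      · exact hyt
    · intro hyt
      refine ⟨List.mem_cons_of_mem _ hyt, ?_⟩
      rw [bne_iff_ne]
      intro h1
      have hym : y = m := hLkey y m (hmt ▸ List.mem_cons_of_mem _ hyt) hmL h1
      have hlt : lexLt y m := (List.pairwise_cons.mp (hmt ▸ hLpw)).1 y hyt
      rw [hym] at hlt
      unfold lexLt at hlt
      omega
  cases t with
  | nil =>
    have hrnil : G.filter (fun g => g.1 != m.1) = [] := by
      rw [List.eq_nil_iff_forall_not_mem]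
      intro y hy
      exact List.not_mem_nil ((hrest y).mp hy)
    have hb1 : PySem.List.pyGetD L 1 ((0 : Int), (0 : Int)) = (0, 0) := by
      rw [hmt]
      simp [PySem.List.pyGetD_ofNat', List.getD]
    have hlen1 : decide (1 < L.length) = false := by
      rw [hmt]
      simp
    rw [hrnil, hb1, hlen1]
    simp
  | cons q t2 =>
    have hqL : q ∈ L := by rw [hmt]; simp
    have hb1 : PySem.List.pyGetD L 1 ((0 : Int), (0 : Int)) = q := by
      rw [hmt]
      simp [PySem.List.pyGetD_ofNat', List.getD]
    have hqrest : q ∈ G.filter (fun g => g.1 != m.1) := (hrest q).mpr (by simp)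
    have hrne : G.filter (fun g => g.1 != m.1) ≠ [] := List.ne_nil_of_mem hqrest
    have htpw2 : (q :: t2).Pairwise (fun a b => lexLt b a) :=
      (List.pairwise_cons.mp (hmt ▸ hLpw)).2
    have hsecond : (PySem.List.max2? (G.filter (fun g => g.1 != m.1))
        (fun g => g.2) (fun g => g.1)).getD (0, 0) = q := by
      rw [max2_of_unique _ q hqrest ?_]
      · rfl
      · intro y hy hyq
        rcases List.mem_cons.mp ((hrest y).mp hy) with rfl | hyt2
        · exact absurd rfl hyq
        · exact (List.pairwise_cons.mp htpw2).1 y hyt2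
    have hlen1 : decide (1 < L.length) = true := by
      rw [hmt]
      simp [List.length_cons]
    rw [hb1, hlen1, if_neg (fun hh : (G.filter (fun g => g.1 != m.1)).isEmpty = true =>
      hrne (List.isEmpty_iff.mp hh)), hsecond]
    simp
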